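-- pv_equiv track=rewrite | github.com/jliao1/PythonStudy | 九章算法/字典和集合/其他题集结合.py | areSentencesSimilarTwo2
-- ===== SOURCE A (Python) =====
-- def areSentencesSimilarTwo2(words1, words2, pairs):
--     """
--     这题可以用union find可以做，但现在我不会，以后再看
--
--     我这种时间复杂度感觉是O(np) n是words1/words2的长度，p是看一个word最多可能有几个同义词
--     """
--     if not words1 and not words2:
--         return True
--     if not words1 or not words2 or len(words1) != len(words2):
--         return False
--
--     # construct map
--     dic = {}
--     for each in pairs:
--         # get specific words
--         w1 = each[0]
--         w2 = each[1]
--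
--         # words1 => words2 就是words1映射到words2
--         dic.setdefault(w1, set())
--         dic[w1].add(w2)
--
--         # words2 => words1 就是words2映射到words1
--         dic.setdefault(w2, set())
--         dic[w2].add(w1)
--
--     # 这个递归函数用s去重查找，就不会无限循环导致stack overflow了
--     def find_all_sub_sets(w1):
--         sub_s = dic.get(w1, None)
--         if sub_s:
--             for each in sub_s:
--                 if each in Sets:
--                     continue
--                 else:
--                     Sets.add(each)
--                     find_all_sub_sets(each)
--         else:
--             return
--
--     # begin search
--     size = len(words1)
--     for i in range(size):
--         w1 = words1[i]
--         w2 = words2[i]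
--
--         if w1 == w2:
--             continue
--
--         Sets = set()
--         find_all_sub_sets(w1)
--
--         if Sets and w2 in Sets:
--             continue
--         else:
--             return False
--
--     return True
-- ===== SOURCE B (Python) =====
-- def areSentencesSimilarTwo2(words1, words2, pairs):
--     # Build connected components of the synonym graph ONCE (merge-smaller-group
--     # labelling), then answer every position by comparing component labels.
--     if len(words1) != len(words2):
--         return False
--     label = {}      # word -> component label
--     members = {}    # component label -> list of its words
--     nxt = 0
--     for p in pairs:
--         x, y = p[0], p[1]
--         lx = label.get(x)
--         ly = label.get(y)
--         if lx is None and ly is None: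
--             label[x] = label[y] = nxt
--             members[nxt] = [x, y]
--             nxt += 1
--         elif lx is None:
--             label[x] = ly
--             members[ly].append(x)
--         elif ly is None:
--             label[y] = lx
--             members[lx].append(y)
--         elif lx != ly:
--             if len(members[lx]) < len(members[ly]):
--                 lx, ly = ly, lx
--             for w in members[ly]:
--                 label[w] = lx
--             members[lx].extend(members[ly])
--             del members[ly]
--     for a, b in zip(words1, words2):
--         if a == b:
--             continue
--         la = label.get(a)
--         if la is None or la != label.get(b):
--             return False
--     return True
-- ===== Notes on version B (the rewrite author's own statement) =====
-- stated objective: alternative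
-- what changed: B replaces A's per-position recursive DFS over an adjacency dict (rebuilding the reachable set for every differing word pair) by a single merge-components pass over pairs (word labels plus relabel-the-smaller-group union) followed by an O(1) label comparison per position.
-- outside the precondition, e.g. on areSentencesSimilarTwo2([], [], [[]]): A returns True, B raises IndexError
import Mathlib
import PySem

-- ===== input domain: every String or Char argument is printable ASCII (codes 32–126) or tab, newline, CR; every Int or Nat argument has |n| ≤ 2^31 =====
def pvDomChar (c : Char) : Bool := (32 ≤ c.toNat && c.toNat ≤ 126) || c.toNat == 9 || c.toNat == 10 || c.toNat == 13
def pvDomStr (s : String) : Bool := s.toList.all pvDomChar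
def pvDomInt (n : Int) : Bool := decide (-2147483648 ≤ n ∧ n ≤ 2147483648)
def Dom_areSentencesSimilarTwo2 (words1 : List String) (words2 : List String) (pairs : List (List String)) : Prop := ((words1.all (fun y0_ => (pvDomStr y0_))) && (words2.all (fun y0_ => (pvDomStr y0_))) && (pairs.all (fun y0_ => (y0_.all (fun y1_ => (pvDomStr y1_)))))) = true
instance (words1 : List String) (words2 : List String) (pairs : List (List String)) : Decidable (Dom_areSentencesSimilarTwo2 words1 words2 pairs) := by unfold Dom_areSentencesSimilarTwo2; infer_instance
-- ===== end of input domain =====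

-- B replaces A's per-position recursive DFS by one merge-components pass over `pairs`
-- (relabel the smaller group on union) and a label comparison per position; objective: alternative.

-- ===== PORT A =====

-- `dic.setdefault(w, set()); dic[w].add(v)` is exactly `Dict.modify w ∅ (·.add v)`
-- (append a fresh key at the end, update the value in place otherwise).
def buildDic (pairs : List (List String)) : PySem.Dict String (PySem.Set String) :=
  pairs.foldl (fun d each =>
    match PySem.List.pyGet? each 0, PySem.List.pyGet? each 1 with
    | some w1, some w2 =>
        (d.modify w1 PySem.Set.empty (fun s => PySem.Set.add s w2)).modify w2
          PySem.Set.empty (fun s => PySem.Set.add s w1)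
    | _, _ => d)  -- each[0] / each[1] out of range: Python raises IndexError (outside Pre_)
    PySem.Dict.empty

-- `find_all_sub_sets`: the recursion consumes fuel; the caller passes
-- 2*len(pairs)+1 which exceeds the recursion depth (`findAll_closed` uses exactly this).
def findAllSubSets (dic : PySem.Dict String (PySem.Set String)) :
    Nat → String → PySem.Set String → PySem.Set String
  | 0, _, sets => sets   -- fuel guard only, never reached with the caller's fuel
  | fuel+1, w1, sets =>
    match dic.get? w1 with
    | some subS =>
        if subS.isEmpty then sets   -- `if sub_s:` is falsy on the empty set
        else subS.foldl (fun s each =>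
          if PySem.Set.contains s each then s
          else findAllSubSets dic fuel each (PySem.Set.add s each)) sets
    | none => sets

-- `for i in range(size)` over the two equally long lists
def loopA (dic : PySem.Dict String (PySem.Set String)) (fuel : Nat) :
    List String → List String → Bool
  | w1 :: r1, w2 :: r2 =>
      if w1 = w2 then loopA dic fuel r1 r2
      else
        let sets := findAllSubSets dic fuel w1 PySem.Set.empty
        if (!sets.isEmpty) && PySem.Set.contains sets w2 then loopA dic fuel r1 r2
        else false
  | _, _ => true

def areSentencesSimilarTwo2 (words1 : List String) (words2 : List String) (pairs : List (List String)) : Bool :=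
  if words1.isEmpty && words2.isEmpty then true
  else if words1.isEmpty || words2.isEmpty || words1.length ≠ words2.length then false
  else loopA (buildDic pairs) (2 * pairs.length + 1) words1 words2

-- ===== PORT B =====

-- one step of Source B's pair loop; state = (label, members, nxt)
def bStep (st : PySem.Dict String Int × PySem.Dict Int (List String) × Int)
    (p : List String) : PySem.Dict String Int × PySem.Dict Int (List String) × Int :=
  match PySem.List.pyGet? p 0, PySem.List.pyGet? p 1 with
  | some x, some y =>
    match st.1.get? x, st.1.get? y with
    | none, none =>
        ((st.1.insert x st.2.2).insert y st.2.2, st.2.1.insert st.2.2 [x, y], st.2.2 + 1)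
    | none, some ly => (st.1.insert x ly, st.2.1.modify ly [] (fun g => g ++ [x]), st.2.2)
    | some lx, none => (st.1.insert y lx, st.2.1.modify lx [] (fun g => g ++ [y]), st.2.2)
    | some lx, some ly =>
        if lx = ly then st
        else
          -- members[lx] / members[ly] rendered total with getD (the keys are always present)
          let q := if (st.2.1.getD lx []).length < (st.2.1.getD ly []).length
                   then (ly, lx) else (lx, ly)
          let gb := st.2.1.getD q.2 []
          (gb.foldl (fun d w => d.insert w q.1) st.1,
           (st.2.1.modify q.1 [] (fun g => g ++ gb)).erase q.2, st.2.2)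
  | _, _ => st  -- p[0] / p[1] out of range: Python raises IndexError (outside Pre_)

-- `for a, b in zip(words1, words2)`
def loopB (lab : PySem.Dict String Int) : List String → List String → Bool
  | a :: r1, b :: r2 =>
      if a = b then loopB lab r1 r2
      else
        match lab.get? a with
        | none => false
        | some la => if lab.get? b = some la then loopB lab r1 r2 else false
  | _, _ => true

def areSentencesSimilarTwo2_alt (words1 : List String) (words2 : List String) (pairs : List (List String)) : Bool :=
  if words1.length ≠ words2.length then false
  else loopB (pairs.foldl bStep (PySem.Dict.empty, PySem.Dict.empty, 0)).1 words1 words2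

-- ===== PRECONDITION & SPEC =====

-- Pre_ excludes inputs whose `pairs` contain a list of fewer than two words while the two
-- sentences have equal length: there A raises IndexError whenever the sentences are nonempty,
-- and on the remaining corner (both sentences empty) A returns True without ever reading
-- `pairs` while B itself raises the same IndexError.
def Pre_areSentencesSimilarTwo2 (words1 : List String) (words2 : List String) (pairs : List (List String)) : Prop :=
  words1.length ≠ words2.length ∨ ∀ p ∈ pairs, 2 ≤ p.length
instance (words1 : List String) (words2 : List String) (pairs : List (List String)) : Decidable (Pre_areSentencesSimilarTwo2 words1 words2 pairs) := by unfold Pre_areSentencesSimilarTwo2; infer_instance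

def pvWitness_areSentencesSimilarTwo2 : List String × List String × List (List String) :=
  (["great", "acting"], ["fine", "acting"], [["great", "good"], ["good", "fine"]])

def Spec_areSentencesSimilarTwo2 (words1 : List String) (words2 : List String) (pairs : List (List String)) (out : Bool) : Prop := out = areSentencesSimilarTwo2_alt words1 words2 pairs
instance (words1 : List String) (words2 : List String) (pairs : List (List String)) (out : Bool) : Decidable (Spec_areSentencesSimilarTwo2 words1 words2 pairs out) := by unfold Spec_areSentencesSimilarTwo2; infer_instance

-- ===== CLAIM (what is proved, stated in full; the proofs are below) =====
def Claim_equal_areSentencesSimilarTwo2 : Prop := ∀ (words1 : List String) (words2 : List String) (pairs : List (List String)), Dom_areSentencesSimilarTwo2 words1 words2 pairs → Pre_areSentencesSimilarTwo2 words1 words2 pairs → Spec_areSentencesSimilarTwo2 words1 words2 pairs (areSentencesSimilarTwo2 words1 words2 pairs)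

-- ===== LEMMAS AND PROOFS =====

-- the synonym relation and the words it mentions (proof-only notions)
def pvRel (ps : List (List String)) (a b : String) : Prop :=
  ∃ p ∈ ps, (PySem.List.pyGet? p 0 = some a ∧ PySem.List.pyGet? p 1 = some b) ∨
            (PySem.List.pyGet? p 0 = some b ∧ PySem.List.pyGet? p 1 = some a)

def pvTouched (ps : List (List String)) (a : String) : Prop :=
  ∃ p ∈ ps, ∃ x y, PySem.List.pyGet? p 0 = some x ∧ PySem.List.pyGet? p 1 = some y ∧
    (a = x ∨ a = y)

def nbrs (dic : PySem.Dict String (PySem.Set String)) (w : String) : PySem.Set String :=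
  dic.getD w PySem.Set.empty

-- generic: reflexive-transitive closure after adding the single undirected edge x–y
theorem rtg_union_edge {α : Type} (r : α → α → Prop) (x y a b : α) :
    Relation.ReflTransGen (fun c d => r c d ∨ (c = x ∧ d = y) ∨ (c = y ∧ d = x)) a b ↔
    (Relation.ReflTransGen r a b ∨
      (Relation.ReflTransGen r a x ∧ Relation.ReflTransGen r y b) ∨
      (Relation.ReflTransGen r a y ∧ Relation.ReflTransGen r x b)) := by
  constructor
  · intro h
    induction h with
    | refl => exact Or.inl Relation.ReflTransGen.refl
    | @tail c d hac hcd ih =>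
      rcases hcd with hr | ⟨hcx, hdy⟩ | ⟨hcy, hdx⟩
      · rcases ih with h1 | ⟨h1, h2⟩ | ⟨h1, h2⟩
        · exact Or.inl (h1.tail hr)
        · exact Or.inr (Or.inl ⟨h1, h2.tail hr⟩)
        · exact Or.inr (Or.inr ⟨h1, h2.tail hr⟩)
      · subst hcx; subst hdy
        rcases ih with h1 | ⟨h1, h2⟩ | ⟨h1, h2⟩
        · exact Or.inr (Or.inl ⟨h1, Relation.ReflTransGen.refl⟩)
        · exact Or.inr (Or.inl ⟨h1, Relation.ReflTransGen.refl⟩)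
        · exact Or.inl h1
      · subst hcy; subst hdx
        rcases ih with h1 | ⟨h1, h2⟩ | ⟨h1, h2⟩
        · exact Or.inr (Or.inr ⟨h1, Relation.ReflTransGen.refl⟩)
        · exact Or.inl h1
        · exact Or.inr (Or.inr ⟨h1, Relation.ReflTransGen.refl⟩)
  · intro h
    have hmono : ∀ {c d : α}, Relation.ReflTransGen r c d →
        Relation.ReflTransGen (fun c d => r c d ∨ (c = x ∧ d = y) ∨ (c = y ∧ d = x)) c d :=
      fun h => Relation.ReflTransGen.mono (fun _ _ hr => Or.inl hr) h
    have hedge : Relation.ReflTransGen (fun c d => r c d ∨ (c = x ∧ d = y) ∨ (c = y ∧ d = x)) x y :=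
      Relation.ReflTransGen.single (Or.inr (Or.inl ⟨rfl, rfl⟩))
    have hedge' : Relation.ReflTransGen (fun c d => r c d ∨ (c = x ∧ d = y) ∨ (c = y ∧ d = x)) y x :=
      Relation.ReflTransGen.single (Or.inr (Or.inr ⟨rfl, rfl⟩))
    rcases h with h1 | ⟨h1, h2⟩ | ⟨h1, h2⟩
    · exact hmono h1
    · exact ((hmono h1).trans hedge).trans (hmono h2)
    · exact ((hmono h1).trans hedge').trans (hmono h2)

theorem rtg_congr {α : Type} {r r' : α → α → Prop} (h : ∀ c d, r c d ↔ r' c d) (a b : α) :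
    Relation.ReflTransGen r a b ↔ Relation.ReflTransGen r' a b := by
  constructor
  · intro hh; exact Relation.ReflTransGen.mono (fun c d hcd => (h c d).mp hcd) hh
  · intro hh; exact Relation.ReflTransGen.mono (fun c d hcd => (h c d).mpr hcd) hh

theorem pvRel_symm {ps : List (List String)} {a b : String} (h : pvRel ps a b) : pvRel ps b a := by
  obtain ⟨p, hp, h⟩ := h; exact ⟨p, hp, h.symm⟩

theorem pvRel_touched_right {ps : List (List String)} {a b : String} (h : pvRel ps a b) :
    pvTouched ps b := by
  obtain ⟨p, hp, h⟩ := h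
  rcases h with ⟨h0, h1⟩ | ⟨h0, h1⟩
  · exact ⟨p, hp, a, b, h0, h1, Or.inr rfl⟩
  · exact ⟨p, hp, b, a, h0, h1, Or.inl rfl⟩

theorem pvRel_touched_left {ps : List (List String)} {a b : String} (h : pvRel ps a b) :
    pvTouched ps a := pvRel_touched_right (pvRel_symm h)

theorem rtg_pvRel_symm {ps : List (List String)} {a b : String}
    (h : Relation.ReflTransGen (pvRel ps) a b) : Relation.ReflTransGen (pvRel ps) b a :=
  Relation.ReflTransGen.symmetric (fun _ _ hr => pvRel_symm hr) h

theorem rtg_untouched_right {ps : List (List String)} {a b : String}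
    (hnb : ¬ pvTouched ps b) : Relation.ReflTransGen (pvRel ps) a b ↔ a = b := by
  constructor
  · intro h
    induction h with
    | refl => rfl
    | tail _ hcd _ => exact absurd (pvRel_touched_right hcd) hnb
  · intro h; subst h; exact Relation.ReflTransGen.refl

theorem tg_endpoints {ps : List (List String)} {a b : String}
    (h : Relation.TransGen (pvRel ps) a b) : pvTouched ps a ∧ pvTouched ps b := by
  induction h with
  | single hr => exact ⟨pvRel_touched_left hr, pvRel_touched_right hr⟩
  | tail _ hr ih => exact ⟨ih.1, pvRel_touched_right hr⟩

theorem tg_pvRel_iff {ps : List (List String)} {a b : String} (hne : a ≠ b) :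
    Relation.TransGen (pvRel ps) a b ↔
      (pvTouched ps a ∧ pvTouched ps b ∧ Relation.ReflTransGen (pvRel ps) a b) := by
  constructor
  · intro h
    exact ⟨(tg_endpoints h).1, (tg_endpoints h).2, h.to_reflTransGen⟩
  · rintro ⟨_, _, hr⟩
    rcases (Relation.reflTransGen_iff_eq_or_transGen).mp hr with h | h
    · exact absurd h.symm hne
    · exact h

theorem pvRel_append_good {ps : List (List String)} {p : List String} {x y : String}
    (hx : PySem.List.pyGet? p 0 = some x) (hy : PySem.List.pyGet? p 1 = some y) (a b : String) :
    pvRel (ps ++ [p]) a b ↔ (pvRel ps a b ∨ (a = x ∧ b = y) ∨ (a = y ∧ b = x)) := by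
  constructor
  · rintro ⟨q, hq, h⟩
    rcases List.mem_append.mp hq with hq | hq
    · exact Or.inl ⟨q, hq, h⟩
    · rw [List.mem_singleton] at hq; subst hq
      rcases h with ⟨h0, h1⟩ | ⟨h0, h1⟩
      · rw [hx] at h0; rw [hy] at h1
        exact Or.inr (Or.inl ⟨(Option.some_inj.mp h0).symm, (Option.some_inj.mp h1).symm⟩)
      · rw [hx] at h0; rw [hy] at h1
        exact Or.inr (Or.inr ⟨(Option.some_inj.mp h1).symm, (Option.some_inj.mp h0).symm⟩)
  · rintro (⟨q, hq, h⟩ | ⟨ha, hb⟩ | ⟨ha, hb⟩)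
    · exact ⟨q, List.mem_append_left _ hq, h⟩
    · exact ⟨p, List.mem_append_right _ (List.mem_singleton.mpr rfl), Or.inl ⟨ha ▸ hx, hb ▸ hy⟩⟩
    · exact ⟨p, List.mem_append_right _ (List.mem_singleton.mpr rfl), Or.inr ⟨hb ▸ hx, ha ▸ hy⟩⟩

theorem pvTouched_append_good {ps : List (List String)} {p : List String} {x y : String}
    (hx : PySem.List.pyGet? p 0 = some x) (hy : PySem.List.pyGet? p 1 = some y) (a : String) :
    pvTouched (ps ++ [p]) a ↔ (pvTouched ps a ∨ a = x ∨ a = y) := by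
  constructor
  · rintro ⟨q, hq, u, v, h0, h1, hav⟩
    rcases List.mem_append.mp hq with hq | hq
    · exact Or.inl ⟨q, hq, u, v, h0, h1, hav⟩
    · rw [List.mem_singleton] at hq; subst hq
      rw [hx] at h0; rw [hy] at h1
      rcases hav with h | h
      · exact Or.inr (Or.inl (h.trans (Option.some_inj.mp h0).symm))
      · exact Or.inr (Or.inr (h.trans (Option.some_inj.mp h1).symm))
  · rintro (⟨q, hq, u, v, h0, h1, hav⟩ | h | h)
    · exact ⟨q, List.mem_append_left _ hq, u, v, h0, h1, hav⟩
    · exact ⟨p, List.mem_append_right _ (List.mem_singleton.mpr rfl), x, y, hx, hy, Or.inl h⟩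
    · exact ⟨p, List.mem_append_right _ (List.mem_singleton.mpr rfl), x, y, hx, hy, Or.inr h⟩

theorem pvRel_append_bad {ps : List (List String)} {p : List String}
    (h : PySem.List.pyGet? p 0 = none ∨ PySem.List.pyGet? p 1 = none) (a b : String) :
    pvRel (ps ++ [p]) a b ↔ pvRel ps a b := by
  constructor
  · rintro ⟨q, hq, hh⟩
    rcases List.mem_append.mp hq with hq | hq
    · exact ⟨q, hq, hh⟩
    · rw [List.mem_singleton] at hq; subst hq
      rcases hh with ⟨h0, h1⟩ | ⟨h0, h1⟩ <;> rcases h with h | h <;> simp_all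
  · rintro ⟨q, hq, hh⟩; exact ⟨q, List.mem_append_left _ hq, hh⟩

theorem pvTouched_append_bad {ps : List (List String)} {p : List String}
    (h : PySem.List.pyGet? p 0 = none ∨ PySem.List.pyGet? p 1 = none) (a : String) :
    pvTouched (ps ++ [p]) a ↔ pvTouched ps a := by
  constructor
  · rintro ⟨q, hq, u, v, h0, h1, hav⟩
    rcases List.mem_append.mp hq with hq | hq
    · exact ⟨q, hq, u, v, h0, h1, hav⟩
    · rw [List.mem_singleton] at hq; subst hq
      rcases h with h | h <;> simp_all
  · rintro ⟨q, hq, u, v, h0, h1, hav⟩; exact ⟨q, List.mem_append_left _ hq, u, v, h0, h1, hav⟩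

theorem rtg_append_good {ps : List (List String)} {p : List String} {x y : String}
    (hx : PySem.List.pyGet? p 0 = some x) (hy : PySem.List.pyGet? p 1 = some y) (a b : String) :
    Relation.ReflTransGen (pvRel (ps ++ [p])) a b ↔
      (Relation.ReflTransGen (pvRel ps) a b ∨
        (Relation.ReflTransGen (pvRel ps) a x ∧ Relation.ReflTransGen (pvRel ps) y b) ∨
        (Relation.ReflTransGen (pvRel ps) a y ∧ Relation.ReflTransGen (pvRel ps) x b)) := by
  rw [rtg_congr (fun c d => pvRel_append_good hx hy c d) a b]
  exact rtg_union_edge (pvRel ps) x y a b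

-- ---- A side: the dictionary and the DFS ----

theorem mem_buildDic (ps : List (List String)) (a b : String) :
    b ∈ nbrs (buildDic ps) a ↔ pvRel ps a b := by
  induction ps using List.reverseRecOn generalizing a b with
  | nil => simp [buildDic, nbrs, pvRel, PySem.Dict.getD_empty]
  | append_singleton ps p ih =>
    have hfold : buildDic (ps ++ [p]) =
        (match PySem.List.pyGet? p 0, PySem.List.pyGet? p 1 with
          | some w1, some w2 =>
              ((buildDic ps).modify w1 PySem.Set.empty (fun s => PySem.Set.add s w2)).modify w2
                PySem.Set.empty (fun s => PySem.Set.add s w1)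
          | _, _ => buildDic ps) := by
      simp [buildDic, List.foldl_append]
    cases h0 : PySem.List.pyGet? p 0 with
    | none =>
      rw [pvRel_append_bad (Or.inl h0) a b, ← ih a b, hfold, h0]
    | some x =>
      cases h1 : PySem.List.pyGet? p 1 with
      | none =>
        rw [pvRel_append_bad (Or.inr h1) a b, ← ih a b, hfold, h0, h1]
      | some y =>
        rw [pvRel_append_good h0 h1 a b, hfold, h0, h1]
        simp only [nbrs] at ih ⊢
        simp only [PySem.Dict.getD_modify]
        split_ifs <;> simp_all

-- all words mentioned by pairs, as a Set (bounds the DFS fuel)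
def endpointsSet (ps : List (List String)) : PySem.Set String :=
  ps.foldl (fun acc p =>
    match PySem.List.pyGet? p 0, PySem.List.pyGet? p 1 with
    | some x, some y => PySem.Set.add (PySem.Set.add acc x) y
    | _, _ => acc) PySem.Set.empty

theorem endpointsSet_append (ps : List (List String)) (p : List String) :
    endpointsSet (ps ++ [p]) =
      (match PySem.List.pyGet? p 0, PySem.List.pyGet? p 1 with
        | some x, some y => PySem.Set.add (PySem.Set.add (endpointsSet ps) x) y
        | _, _ => endpointsSet ps) := by
  simp [endpointsSet, List.foldl_append]

theorem mem_endpointsSet (ps : List (List String)) (a : String) :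
    a ∈ endpointsSet ps ↔ pvTouched ps a := by
  induction ps using List.reverseRecOn generalizing a with
  | nil => simp [endpointsSet, pvTouched, PySem.Set.empty]
  | append_singleton ps p ih =>
    rw [endpointsSet_append]
    cases h0 : PySem.List.pyGet? p 0 with
    | none => rw [pvTouched_append_bad (Or.inl h0) a]; exact ih a
    | some x =>
      cases h1 : PySem.List.pyGet? p 1 with
      | none => rw [pvTouched_append_bad (Or.inr h1) a]; exact ih a
      | some y =>
        rw [pvTouched_append_good h0 h1 a]
        simp only [PySem.Set.mem_add, ih a]
        tauto

theorem nodup_endpointsSet (ps : List (List String)) : (endpointsSet ps).Nodup := by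
  induction ps using List.reverseRecOn with
  | nil => exact List.nodup_nil
  | append_singleton ps p ih =>
    rw [endpointsSet_append]
    cases h0 : PySem.List.pyGet? p 0 <;> cases h1 : PySem.List.pyGet? p 1 <;>
      simp only [] <;> try exact ih
    exact PySem.Set.nodup_add _ _ (PySem.Set.nodup_add _ _ ih)

theorem set_add_length_le {s : PySem.Set String} {x : String} :
    (PySem.Set.add s x).length ≤ s.length + 1 := by
  rw [PySem.Set.add_eq_ite]
  split
  · omega
  · simp

theorem length_endpointsSet_le (ps : List (List String)) :
    (endpointsSet ps).length ≤ 2 * ps.length := by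
  induction ps using List.reverseRecOn with
  | nil => simp [endpointsSet]
  | append_singleton ps p ih =>
    rw [endpointsSet_append]
    have hl : (ps ++ [p]).length = ps.length + 1 := by simp
    cases h0 : PySem.List.pyGet? p 0 with
    | none => simp only [hl]; omega
    | some x =>
      cases h1 : PySem.List.pyGet? p 1 with
      | none => simp only [hl]; omega
      | some y =>
        simp only [hl]
        have g1 := set_add_length_le (s := PySem.Set.add (endpointsSet ps) x) (x := y)
        have g2 := set_add_length_le (s := endpointsSet ps) (x := x)
        omega

theorem nodup_length_le {l1 l2 : List String} (h : l1.Nodup) (hs : l1 ⊆ l2) :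
    l1.length ≤ l2.length := by
  have h1 : l1.toFinset.card = l1.length := List.toFinset_card_of_nodup h
  have h2 : l1.toFinset ⊆ l2.toFinset := by
    intro z hz; simp only [List.mem_toFinset] at hz ⊢; exact hs hz
  have h3 := Finset.card_le_card h2
  have h4 := l2.toFinset_card_le
  omega

theorem findAll_mono (dic : PySem.Dict String (PySem.Set String)) :
    ∀ fuel w s z, z ∈ s → z ∈ findAllSubSets dic fuel w s := by
  intro fuel
  induction fuel with
  | zero => intro w s z hz; simpa [findAllSubSets] using hz
  | succ f ih =>
    intro w s z hz
    have hfold : ∀ (l : List String) (acc : PySem.Set String), z ∈ acc →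
        z ∈ l.foldl (fun s each => if PySem.Set.contains s each then s
          else findAllSubSets dic f each (PySem.Set.add s each)) acc := by
      intro l
      induction l with
      | nil => intro acc h; simpa using h
      | cons e t iht =>
        intro acc h
        rw [List.foldl_cons]
        apply iht
        split
        · exact h
        · exact ih e (PySem.Set.add acc e) z ((PySem.Set.mem_add _ _ _).mpr (Or.inl h))
    simp only [findAllSubSets]
    split
    · split
      · exact hz
      · exact hfold _ s hz
    · exact hz


theorem findAll_sound (dic : PySem.Dict String (PySem.Set String)) :
    ∀ fuel w s z, z ∈ findAllSubSets dic fuel w s →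
      z ∈ s ∨ Relation.TransGen (fun c d => d ∈ nbrs dic c) w z := by
  intro fuel
  induction fuel with
  | zero => intro w s z hz; exact Or.inl (by simpa [findAllSubSets] using hz)
  | succ f ih =>
    intro w s z
    simp only [findAllSubSets]
    split
    · rename_i subS hg
      split
      · exact fun hz => Or.inl hz
      · have hsubN : ∀ e ∈ subS, e ∈ nbrs dic w := by
          intro e he
          rw [nbrs, PySem.Dict.getD_of_get?_eq_some _ _ hg]
          exact he
        have hfold : ∀ (l : List String), (∀ e ∈ l, e ∈ nbrs dic w) →
            ∀ acc, (∀ u ∈ acc, u ∈ s ∨ Relation.TransGen (fun c d => d ∈ nbrs dic c) w u) →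
            ∀ u ∈ l.foldl (fun s each => if PySem.Set.contains s each then s
              else findAllSubSets dic f each (PySem.Set.add s each)) acc,
              u ∈ s ∨ Relation.TransGen (fun c d => d ∈ nbrs dic c) w u := by
          intro l
          induction l with
          | nil => intro _ acc hacc u hu; exact hacc u (by simpa using hu)
          | cons e t iht =>
            intro hel acc hacc
            rw [List.foldl_cons]
            by_cases hc : PySem.Set.contains acc e = true
            · simp only [hc, if_true]
              exact iht (fun e' he' => hel e' (List.mem_cons_of_mem _ he')) acc hacc
            · simp only [Bool.not_eq_true] at hc
              simp only [hc, Bool.false_eq_true, if_false]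
              apply iht (fun e' he' => hel e' (List.mem_cons_of_mem _ he'))
              intro u hu
              have he : e ∈ nbrs dic w := hel e List.mem_cons_self
              rcases ih e (PySem.Set.add acc e) u hu with hu' | htg
              · rcases (PySem.Set.mem_add _ _ _).mp hu' with hu'' | hu''
                · exact hacc u hu''
                · subst hu''; exact Or.inr (Relation.TransGen.single he)
              · exact Or.inr (Relation.TransGen.head he htg)
        intro hz
        exact hfold subS hsubN s (fun u hu => Or.inl hu) z hz
    · exact fun hz => Or.inl hz


theorem findAll_closed (dic : PySem.Dict String (PySem.Set String)) (U : PySem.Set String)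
    (hU : ∀ w z, z ∈ nbrs dic w → z ∈ U) (_hUnd : U.Nodup) :
    ∀ fuel w s, s.Nodup → (∀ z ∈ s, z ∈ U) → U.length < fuel + s.length →
      (findAllSubSets dic fuel w s).Nodup ∧
      (∀ z ∈ findAllSubSets dic fuel w s, z ∈ U ∨ z ∈ s) ∧
      (∀ y ∈ nbrs dic w, y ∈ findAllSubSets dic fuel w s) ∧
      (∀ y ∈ findAllSubSets dic fuel w s, y ∉ s →
        ∀ z ∈ nbrs dic y, z ∈ findAllSubSets dic fuel w s) := by
  intro fuel
  induction fuel with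
  | zero =>
    intro w s hnd hsub harith
    exact absurd (nodup_length_le hnd (fun z hz => hsub z hz)) (by omega)
  | succ f ih =>
    intro w s hnd hsub harith
    simp only [findAllSubSets]
    split
    · rename_i subS hg
      have hnbr : nbrs dic w = subS := by
        rw [nbrs, PySem.Dict.getD_of_get?_eq_some _ _ hg]
      split
      · rename_i hemp
        refine ⟨hnd, fun z hz => Or.inr hz, ?_, fun y _ hys => absurd ‹y ∈ s› hys⟩
        intro y hy
        rw [hnbr, List.isEmpty_iff.mp hemp] at hy
        exact absurd hy (List.not_mem_nil)
      · have hsubN : ∀ e ∈ subS, e ∈ nbrs dic w := fun e he => hnbr ▸ he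
        have hfoldP : ∀ (l : List String), (∀ e ∈ l, e ∈ nbrs dic w) →
            ∀ acc : PySem.Set String,
            ((∀ z ∈ s, z ∈ acc) ∧ acc.Nodup ∧ (∀ z ∈ acc, z ∈ U) ∧
              (∀ y ∈ acc, y ∉ s → ∀ z ∈ nbrs dic y, z ∈ acc)) →
            (((∀ z ∈ s, z ∈ l.foldl (fun s each => if PySem.Set.contains s each then s
                else findAllSubSets dic f each (PySem.Set.add s each)) acc) ∧
              (l.foldl (fun s each => if PySem.Set.contains s each then s
                else findAllSubSets dic f each (PySem.Set.add s each)) acc).Nodup ∧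
              (∀ z ∈ l.foldl (fun s each => if PySem.Set.contains s each then s
                else findAllSubSets dic f each (PySem.Set.add s each)) acc, z ∈ U) ∧
              (∀ y ∈ l.foldl (fun s each => if PySem.Set.contains s each then s
                else findAllSubSets dic f each (PySem.Set.add s each)) acc, y ∉ s →
                ∀ z ∈ nbrs dic y, z ∈ l.foldl (fun s each => if PySem.Set.contains s each then s
                  else findAllSubSets dic f each (PySem.Set.add s each)) acc)) ∧
              (∀ z ∈ acc, z ∈ l.foldl (fun s each => if PySem.Set.contains s each then s
                else findAllSubSets dic f each (PySem.Set.add s each)) acc) ∧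
              (∀ e ∈ l, e ∈ l.foldl (fun s each => if PySem.Set.contains s each then s
                else findAllSubSets dic f each (PySem.Set.add s each)) acc)) := by
          intro l
          induction l with
          | nil =>
            intro _ acc hP
            exact ⟨by simpa using hP, fun z hz => by simpa using hz, by simp⟩
          | cons e t iht =>
            intro hel acc hP
            obtain ⟨hPs, hPnd, hPU, hPcl⟩ := hP
            rw [List.foldl_cons]
            by_cases hc : PySem.Set.contains acc e = true
            · simp only [hc, if_true]
              obtain ⟨hP', hmono, hmem⟩ :=
                iht (fun e' he' => hel e' (List.mem_cons_of_mem _ he')) acc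
                  ⟨hPs, hPnd, hPU, hPcl⟩
              refine ⟨hP', hmono, ?_⟩
              intro e' he'
              rcases List.mem_cons.mp he' with he'' | he''
              · subst he''; exact hmono e' ((PySem.Set.contains_iff _ _).mp hc)
              · exact hmem e' he''
            · simp only [Bool.not_eq_true] at hc
              simp only [hc, Bool.false_eq_true, if_false]
              have hene : e ∉ acc := fun h => by
                rw [(PySem.Set.contains_iff _ _).mpr h] at hc; exact Bool.true_eq_false.mp hc
              have heN : e ∈ nbrs dic w := hel e List.mem_cons_self
              have heU : e ∈ U := hU w e heN
              have hnd' : (PySem.Set.add acc e).Nodup := PySem.Set.nodup_add _ _ hPnd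
              have hsub' : ∀ z ∈ PySem.Set.add acc e, z ∈ U := by
                intro z hz
                rcases (PySem.Set.mem_add _ _ _).mp hz with hz' | hz'
                · exact hPU z hz'
                · subst hz'; exact heU
              have hlen : (PySem.Set.add acc e).length = acc.length + 1 := by
                rw [PySem.Set.add_of_not_mem hene, List.length_append, List.length_singleton]
              have hslen : s.length ≤ acc.length := nodup_length_le hnd hPs
              have harith' : U.length < f + (PySem.Set.add acc e).length := by omega
              obtain ⟨hndF, hUF, hnbF, hclF⟩ := ih e (PySem.Set.add acc e) hnd' hsub' harith'
              have haccF : ∀ z ∈ acc, z ∈ findAllSubSets dic f e (PySem.Set.add acc e) := by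
                intro z hz
                exact findAll_mono dic f e _ z ((PySem.Set.mem_add _ _ _).mpr (Or.inl hz))
              have heF : e ∈ findAllSubSets dic f e (PySem.Set.add acc e) :=
                findAll_mono dic f e _ e ((PySem.Set.mem_add _ _ _).mpr (Or.inr rfl))
              have hP' : (∀ z ∈ s, z ∈ findAllSubSets dic f e (PySem.Set.add acc e)) ∧
                  (findAllSubSets dic f e (PySem.Set.add acc e)).Nodup ∧
                  (∀ z ∈ findAllSubSets dic f e (PySem.Set.add acc e), z ∈ U) ∧
                  (∀ y ∈ findAllSubSets dic f e (PySem.Set.add acc e), y ∉ s →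
                    ∀ z ∈ nbrs dic y, z ∈ findAllSubSets dic f e (PySem.Set.add acc e)) := by
                refine ⟨fun z hz => haccF z (hPs z hz), hndF, ?_, ?_⟩
                · intro z hz
                  rcases hUF z hz with h | h
                  · exact h
                  · exact hsub' z h
                · intro y hy hys z hz
                  by_cases hya : y ∈ acc
                  · exact haccF z (hPcl y hya hys z hz)
                  · by_cases hye : y = e
                    · subst hye; exact hnbF z hz
                    · have : y ∉ PySem.Set.add acc e := by
                        intro h
                        rcases (PySem.Set.mem_add _ _ _).mp h with h' | h'
                        · exact hya h'
                        · exact hye h'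
                      exact hclF y hy this z hz
              obtain ⟨hP'', hmono, hmem⟩ :=
                iht (fun e' he' => hel e' (List.mem_cons_of_mem _ he'))
                  (findAllSubSets dic f e (PySem.Set.add acc e)) hP'
              refine ⟨hP'', fun z hz => hmono z (haccF z hz), ?_⟩
              intro e' he'
              rcases List.mem_cons.mp he' with he'' | he''
              · subst he''; exact hmono e' heF
              · exact hmem e' he''
        obtain ⟨⟨h1, h2, h3, h4⟩, hmono, hmem⟩ := hfoldP subS hsubN s
          ⟨fun z hz => hz, hnd, hsub, fun y hy hys => absurd hy hys⟩
        refine ⟨h2, fun z hz => Or.inl (h3 z hz), ?_, h4⟩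
        intro y hy
        rw [hnbr] at hy
        exact hmem y hy
    · refine ⟨hnd, fun z hz => Or.inr hz, ?_, fun y hy hys => absurd hy hys⟩
      intro y hy
      rename_i hg
      rw [nbrs, PySem.Dict.getD_of_get?_eq_none _ _ hg] at hy
      exact absurd hy (List.not_mem_nil)


theorem mem_findAll_iff (pairs : List (List String)) (a b : String) :
    b ∈ findAllSubSets (buildDic pairs) (2 * pairs.length + 1) a PySem.Set.empty ↔
      Relation.TransGen (pvRel pairs) a b := by
  have hU : ∀ w z, z ∈ nbrs (buildDic pairs) w → z ∈ endpointsSet pairs := by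
    intro w z hz
    exact (mem_endpointsSet pairs z).mpr (pvRel_touched_right ((mem_buildDic pairs w z).mp hz))
  constructor
  · intro h
    rcases findAll_sound (buildDic pairs) _ a PySem.Set.empty b h with h' | h'
    · exact absurd h' (List.not_mem_nil)
    · exact Relation.TransGen.mono (fun c d hcd => (mem_buildDic pairs c d).mp hcd) h'
  · intro h
    obtain ⟨_, _, hnb, hcl⟩ := findAll_closed (buildDic pairs) (endpointsSet pairs) hU
      (nodup_endpointsSet pairs) (2 * pairs.length + 1) a PySem.Set.empty List.nodup_nil
      (by intro z hz; exact absurd hz (List.not_mem_nil))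
      (by have hle := length_endpointsSet_le pairs
          simp only [PySem.Set.empty, List.length_nil]; omega)
    induction h with
    | single hr => exact hnb _ ((mem_buildDic pairs a _).mpr hr)
    | tail _ hr ihh => exact hcl _ ihh (List.not_mem_nil) _ ((mem_buildDic pairs _ _).mpr hr)


-- ---- B side: the component-merging invariant ----

def pvInv (ps : List (List String))
    (st : PySem.Dict String Int × PySem.Dict Int (List String) × Int) : Prop :=
  (∀ w l, st.1.get? w = some l → l < st.2.2) ∧
  (∀ w l, st.1.get? w = some l ↔ w ∈ st.2.1.getD l []) ∧
  (∀ a b, (∃ l, st.1.get? a = some l ∧ st.1.get? b = some l) ↔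
    (pvTouched ps a ∧ pvTouched ps b ∧ Relation.ReflTransGen (pvRel ps) a b))

theorem dict_get?_erase {ν : Type} (d : PySem.Dict Int ν) (k k' : Int) :
    (d.erase k).get? k' = if k' = k then none else d.get? k' := by
  obtain ⟨items⟩ := d
  show (List.find? (fun p => p.1 == k') (List.filter (fun p => !p.1 == k) items)).map
      (fun p => p.2) = _
  have key : ∀ l : List (Int × ν),
      List.find? (fun p => p.1 == k') (List.filter (fun p => !p.1 == k) l) =
        if k' = k then none else List.find? (fun p => p.1 == k') l := by
    intro l
    induction l with
    | nil => simp
    | cons hd t iht =>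
      by_cases hk : hd.1 = k
      · have hfil : List.filter (fun p => !p.1 == k) (hd :: t) =
            List.filter (fun p => !p.1 == k) t := by
          simp [hk]
        rw [hfil, iht]
        by_cases hkk : k' = k
        · simp [hkk]
        · have hne : hd.1 ≠ k' := by rw [hk]; exact fun h => hkk h.symm
          rw [if_neg hkk, if_neg hkk, List.find?_cons_of_neg (by simp [hne])]
      · have hfil : List.filter (fun p => !p.1 == k) (hd :: t) =
            hd :: List.filter (fun p => !p.1 == k) t := by
          simp [hk]
        rw [hfil]
        by_cases hk' : hd.1 = k'
        · have hkk : k' ≠ k := fun h => hk (hk'.trans h)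
          rw [List.find?_cons_of_pos (by simp [hk']),
            List.find?_cons_of_pos (by simp [hk']), if_neg hkk]
        · rw [List.find?_cons_of_neg (by simp [hk']),
            List.find?_cons_of_neg (by simp [hk']), iht]
  rw [key items]
  split <;> rfl

theorem get?_foldl_insert_const (la : Int) :
    ∀ (gb : List String) (L : PySem.Dict String Int) (z : String),
      (gb.foldl (fun d w => d.insert w la) L).get? z =
        if z ∈ gb then some la else L.get? z := by
  intro gb
  induction gb with
  | nil => simp
  | cons w t ih =>
    intro L z
    rw [List.foldl_cons, ih]
    by_cases hzt : z ∈ t <;> by_cases hzw : z = w <;>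
      simp [hzt, hzw, PySem.Dict.get?_insert, PySem.Dict.get?_insert_self]

theorem inv_isSome {ps : List (List String)}
    {st : PySem.Dict String Int × PySem.Dict Int (List String) × Int}
    (h : pvInv ps st) (a : String) :
    pvTouched ps a ↔ ∃ l, st.1.get? a = some l := by
  constructor
  · intro ht
    rcases (h.2.2 a a).mpr ⟨ht, ht, Relation.ReflTransGen.refl⟩ with ⟨l, hl, _⟩
    exact ⟨l, hl⟩
  · rintro ⟨l, hl⟩
    exact ((h.2.2 a a).mp ⟨l, hl, hl⟩).1

theorem rtg_untouched_left {ps : List (List String)} {a b : String}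
    (h : ¬ pvTouched ps a) : Relation.ReflTransGen (pvRel ps) a b ↔ a = b := by
  constructor
  · intro hr; exact ((rtg_untouched_right h).mp (rtg_pvRel_symm hr)).symm
  · intro h; subst h; exact Relation.ReflTransGen.refl

theorem inv_conn {ps : List (List String)}
    {st : PySem.Dict String Int × PySem.Dict Int (List String) × Int}
    (h : pvInv ps st) {c d : String} {lc ld : Int}
    (hc : st.1.get? c = some lc) (hd : st.1.get? d = some ld) :
    Relation.ReflTransGen (pvRel ps) c d ↔ lc = ld := by
  constructor
  · intro hr
    have hT : pvTouched ps c := (inv_isSome h c).mpr ⟨lc, hc⟩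
    have hT' : pvTouched ps d := (inv_isSome h d).mpr ⟨ld, hd⟩
    rcases (h.2.2 c d).mpr ⟨hT, hT', hr⟩ with ⟨l, h1, h2⟩
    rw [hc] at h1; rw [hd] at h2
    exact (Option.some_inj.mp h1).trans (Option.some_inj.mp h2).symm
  · intro he; subst he
    exact ((h.2.2 c d).mp ⟨lc, hc, hd⟩).2.2

theorem pvInv_append_bad {ps : List (List String)} {p : List String}
    {st : PySem.Dict String Int × PySem.Dict Int (List String) × Int}
    (hbad : PySem.List.pyGet? p 0 = none ∨ PySem.List.pyGet? p 1 = none)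
    (h : pvInv ps st) : pvInv (ps ++ [p]) st := by
  refine ⟨h.1, h.2.1, ?_⟩
  intro a b
  rw [pvTouched_append_bad hbad a, pvTouched_append_bad hbad b,
    rtg_congr (fun c d => pvRel_append_bad hbad c d) a b]
  exact h.2.2 a b

theorem branch_NN {ps : List (List String)} {p : List String} {x y : String}
    {L : PySem.Dict String Int} {M : PySem.Dict Int (List String)} {n : Int}
    (hinv : pvInv ps (L, M, n))
    (h0 : PySem.List.pyGet? p 0 = some x) (h1 : PySem.List.pyGet? p 1 = some y)
    (hLx : L.get? x = none) (hLy : L.get? y = none) :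
    pvInv (ps ++ [p]) ((L.insert x n).insert y n, M.insert n [x, y], n + 1) := by
  have hsome := inv_isSome hinv
  obtain ⟨hI1, hI2, hI3⟩ := hinv
  dsimp only at hI1 hI2 hI3 hsome
  have hTx : ¬ pvTouched ps x := fun ht => by
    rcases (hsome x).mp ht with ⟨l, hl⟩
    rw [hLx] at hl; cases hl
  have hTy : ¬ pvTouched ps y := fun ht => by
    rcases (hsome y).mp ht with ⟨l, hl⟩
    rw [hLy] at hl; cases hl
  refine ⟨?_, ?_, ?_⟩
  · intro w l hw
    dsimp only at hw ⊢
    simp only [PySem.Dict.get?_insert] at hw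
    split_ifs at hw with hwy hwx
    · injection hw with hh; omega
    · injection hw with hh; omega
    · have := hI1 w l hw; omega
  · intro w l
    dsimp only
    simp only [PySem.Dict.get?_insert, PySem.Dict.getD_insert]
    by_cases hln : l = n
    · rw [if_pos hln]
      split_ifs with hwy hwx
      · exact iff_of_true (by rw [hln]) (by simp [hwy])
      · exact iff_of_true (by rw [hln]) (by simp [hwx])
      · constructor
        · intro hw; have := hI1 w l hw; omega
        · intro hw
          simp only [List.mem_cons, List.not_mem_nil, or_false] at hw
          rcases hw with hh | hh
          · exact absurd hh hwx
          · exact absurd hh hwy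
    · rw [if_neg hln]
      split_ifs with hwy hwx
      · constructor
        · intro hw; injection hw with hh; exact absurd hh.symm hln
        · intro hw
          have hc := (hI2 w l).mpr hw
          rw [hwy, hLy] at hc; cases hc
      · constructor
        · intro hw; injection hw with hh; exact absurd hh.symm hln
        · intro hw
          have hc := (hI2 w l).mpr hw
          rw [hwx, hLx] at hc; cases hc
      · exact hI2 w l
  · intro a b
    dsimp only
    rw [pvTouched_append_good h0 h1 a, pvTouched_append_good h0 h1 b,
      rtg_append_good h0 h1 a b]
    simp only [PySem.Dict.get?_insert]
    have hRax : Relation.ReflTransGen (pvRel ps) a x ↔ a = x := rtg_untouched_right hTx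
    have hRay : Relation.ReflTransGen (pvRel ps) a y ↔ a = y := rtg_untouched_right hTy
    have hRxb : Relation.ReflTransGen (pvRel ps) x b ↔ x = b := rtg_untouched_left hTx
    have hRyb : Relation.ReflTransGen (pvRel ps) y b ↔ y = b := rtg_untouched_left hTy
    have hLn : ∀ c, (c = x ∨ c = y) →
        ((if c = y then some n else if c = x then some n else L.get? c) = some n) := by
      intro c hc
      by_cases hcy : c = y
      · simp [hcy]
      · rcases hc with hc | hc
        · simp [hc]
        · exact absurd hc hcy
    by_cases hax : a = x ∨ a = y
    · by_cases hbx : b = x ∨ b = y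
      · apply iff_of_true
        · exact ⟨n, hLn a hax, hLn b hbx⟩
        · refine ⟨Or.inr hax, Or.inr hbx, ?_⟩
          rcases hax with rfl | rfl <;> rcases hbx with rfl | rfl
          · exact Or.inl Relation.ReflTransGen.refl
          · exact Or.inr (Or.inl ⟨Relation.ReflTransGen.refl, Relation.ReflTransGen.refl⟩)
          · exact Or.inr (Or.inr ⟨Relation.ReflTransGen.refl, Relation.ReflTransGen.refl⟩)
          · exact Or.inl Relation.ReflTransGen.refl
      · rw [not_or] at hbx
        apply iff_of_false
        · rintro ⟨l, hla, hlb⟩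
          rw [hLn a hax] at hla
          rw [if_neg hbx.2, if_neg hbx.1] at hlb
          injection hla with hh; subst hh
          have := hI1 b n hlb; omega
        · rintro ⟨_, _, hd⟩
          rcases hd with hd | ⟨_, hd2⟩ | ⟨_, hd2⟩
          · rcases hax with rfl | rfl
            · exact hbx.1 ((rtg_untouched_left hTx).mp hd).symm
            · exact hbx.2 ((rtg_untouched_left hTy).mp hd).symm
          · exact hbx.2 (hRyb.mp hd2).symm
          · exact hbx.1 (hRxb.mp hd2).symm
    · rw [not_or] at hax
      by_cases hbx : b = x ∨ b = y
      · apply iff_of_false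
        · rintro ⟨l, hla, hlb⟩
          rw [hLn b hbx] at hlb
          rw [if_neg hax.2, if_neg hax.1] at hla
          injection hlb with hh; subst hh
          have := hI1 a n hla; omega
        · rintro ⟨_, _, hd⟩
          rcases hd with hd | ⟨hd1, _⟩ | ⟨hd1, _⟩
          · rcases hbx with rfl | rfl
            · exact hax.1 ((rtg_untouched_right hTx).mp hd)
            · exact hax.2 ((rtg_untouched_right hTy).mp hd)
          · exact hax.1 (hRax.mp hd1)
          · exact hax.2 (hRay.mp hd1)
      · rw [not_or] at hbx
        rw [if_neg hax.2, if_neg hax.1, if_neg hbx.2, if_neg hbx.1]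
        constructor
        · intro hl
          obtain ⟨hTa, hTb, hr⟩ := (hI3 a b).mp hl
          exact ⟨Or.inl hTa, Or.inl hTb, Or.inl hr⟩
        · rintro ⟨hTa', hTb', hd⟩
          have hTa : pvTouched ps a := by
            rcases hTa' with h | h | h
            · exact h
            · exact absurd h hax.1
            · exact absurd h hax.2
          have hTb : pvTouched ps b := by
            rcases hTb' with h | h | h
            · exact h
            · exact absurd h hbx.1
            · exact absurd h hbx.2
          have hr : Relation.ReflTransGen (pvRel ps) a b := by
            rcases hd with hd | ⟨hd1, _⟩ | ⟨hd1, _⟩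
            · exact hd
            · exact absurd (hRax.mp hd1) hax.1
            · exact absurd (hRay.mp hd1) hax.2
          exact (hI3 a b).mpr ⟨hTa, hTb, hr⟩

theorem branch_NS {ps : List (List String)} {p : List String} {x y : String}
    {L : PySem.Dict String Int} {M : PySem.Dict Int (List String)} {n : Int} {ly : Int}
    (hinv : pvInv ps (L, M, n))
    (h0 : PySem.List.pyGet? p 0 = some x) (h1 : PySem.List.pyGet? p 1 = some y)
    (hLx : L.get? x = none) (hLy : L.get? y = some ly) :
    pvInv (ps ++ [p]) (L.insert x ly, M.modify ly [] (fun g => g ++ [x]), n) := by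
  have hsome := inv_isSome hinv
  have hI1 := hinv.1
  have hI2 := hinv.2.1
  have hI3 := hinv.2.2
  dsimp only at hI1 hI2 hI3 hsome
  have hTx : ¬ pvTouched ps x := fun ht => by
    rcases (hsome x).mp ht with ⟨l, hl⟩; rw [hLx] at hl; cases hl
  have hTy : pvTouched ps y := (hsome y).mpr ⟨ly, hLy⟩
  have hxy : x ≠ y := fun h => by rw [h, hLy] at hLx; cases hLx
  have hlyn : ly < n := hI1 y ly hLy
  refine ⟨?_, ?_, ?_⟩
  · intro w l hw
    dsimp only at hw ⊢
    rw [PySem.Dict.get?_insert] at hw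
    split_ifs at hw with hwx
    · injection hw with hh; omega
    · exact hI1 w l hw
  · intro w l
    dsimp only
    rw [PySem.Dict.get?_insert, PySem.Dict.getD_modify]
    by_cases hlly : l = ly
    · rw [if_pos hlly]
      split_ifs with hwx
      · exact iff_of_true (by rw [hlly]) (by simp [hwx])
      · constructor
        · intro hw
          have hm := (hI2 w l).mp hw
          rw [hlly] at hm
          exact List.mem_append_left _ hm
        · intro hw
          rcases List.mem_append.mp hw with hm | hm
          · exact (hI2 w l).mpr (by rw [hlly]; exact hm)
          · rw [List.mem_singleton] at hm; exact absurd hm hwx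
    · rw [if_neg hlly]
      split_ifs with hwx
      · constructor
        · intro hw; injection hw with hh; exact absurd hh.symm hlly
        · intro hw
          have hc := (hI2 w l).mpr hw
          rw [hwx, hLx] at hc; cases hc
      · exact hI2 w l
  · intro a b
    dsimp only
    rw [pvTouched_append_good h0 h1 a, pvTouched_append_good h0 h1 b,
      rtg_append_good h0 h1 a b]
    simp only [PySem.Dict.get?_insert]
    have hRax : Relation.ReflTransGen (pvRel ps) a x ↔ a = x := rtg_untouched_right hTx
    have hRxb : Relation.ReflTransGen (pvRel ps) x b ↔ x = b := rtg_untouched_left hTx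
    have hRxy : Relation.ReflTransGen (pvRel ps) x y ↔ x = y := rtg_untouched_left hTx
    have hyb : ∀ c, (pvTouched ps c ∧ Relation.ReflTransGen (pvRel ps) y c) ↔
        L.get? c = some ly := by
      intro c; constructor
      · rintro ⟨hTc, hr⟩
        rcases (hsome c).mp hTc with ⟨lc, hlc⟩
        have he := (inv_conn hinv hLy hlc).mp hr
        rw [hlc, ← he]
      · intro hlc
        exact ⟨(hsome c).mpr ⟨ly, hlc⟩, (inv_conn hinv hLy hlc).mpr rfl⟩
    by_cases hax : a = x <;> by_cases hbx : b = x
    · subst hax; subst hbx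
      apply iff_of_true
      · exact ⟨ly, by simp, by simp⟩
      · exact ⟨Or.inr (Or.inl rfl), Or.inr (Or.inl rfl), Or.inl Relation.ReflTransGen.refl⟩
    · subst hax
      rw [if_pos rfl, if_neg hbx]
      constructor
      · rintro ⟨l, hl1, hl2⟩
        injection hl1 with hh; subst hh
        have hTb := (hsome b).mpr ⟨_, hl2⟩
        have hr : Relation.ReflTransGen (pvRel ps) y b := ((hyb b).mpr hl2).2
        exact ⟨Or.inr (Or.inl rfl), Or.inl hTb,
          Or.inr (Or.inl ⟨Relation.ReflTransGen.refl, hr⟩)⟩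
      · rintro ⟨_, hTb', hd⟩
        have hlb : L.get? b = some ly := by
          rcases hd with hd | ⟨_, hd2⟩ | ⟨hd1, _⟩
          · exact absurd (hRxb.mp hd).symm hbx
          · rcases hTb' with h | h | h
            · exact (hyb b).mp ⟨h, hd2⟩
            · exact absurd h hbx
            · rw [h]; exact hLy
          · exact absurd (hRxy.mp hd1) hxy
        exact ⟨ly, rfl, hlb⟩
    · subst hbx
      rw [if_pos rfl, if_neg hax]
      constructor
      · rintro ⟨l, hl1, hl2⟩
        injection hl2 with hh; subst hh
        have hTa := (hsome a).mpr ⟨_, hl1⟩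
        have hr : Relation.ReflTransGen (pvRel ps) y a := ((hyb a).mpr hl1).2
        exact ⟨Or.inl hTa, Or.inr (Or.inl rfl),
          Or.inr (Or.inr ⟨rtg_pvRel_symm hr, Relation.ReflTransGen.refl⟩)⟩
      · rintro ⟨hTa', _, hd⟩
        have hla : L.get? a = some ly := by
          rcases hd with hd | ⟨hd1, _⟩ | ⟨hd1, _⟩
          · exact absurd ((rtg_untouched_right hTx).mp hd) hax
          · exact absurd (hRax.mp hd1) hax
          · rcases hTa' with h | h | h
            · exact (hyb a).mp ⟨h, rtg_pvRel_symm hd1⟩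
            · exact absurd h hax
            · rw [h]; exact hLy
        exact ⟨ly, hla, rfl⟩
    · rw [if_neg hax, if_neg hbx]
      constructor
      · intro hl
        obtain ⟨hTa, hTb, hr⟩ := (hI3 a b).mp hl
        exact ⟨Or.inl hTa, Or.inl hTb, Or.inl hr⟩
      · rintro ⟨hTa', hTb', hd⟩
        have hTa : pvTouched ps a := by
          rcases hTa' with h | h | h
          · exact h
          · exact absurd h hax
          · rw [h]; exact hTy
        have hTb : pvTouched ps b := by
          rcases hTb' with h | h | h
          · exact h
          · exact absurd h hbx
          · rw [h]; exact hTy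
        have hr : Relation.ReflTransGen (pvRel ps) a b := by
          rcases hd with hd | ⟨hd1, _⟩ | ⟨_, hd2⟩
          · exact hd
          · exact absurd (hRax.mp hd1) hax
          · exact absurd (hRxb.mp hd2).symm hbx
        exact (hI3 a b).mpr ⟨hTa, hTb, hr⟩

theorem branch_SN {ps : List (List String)} {p : List String} {x y : String}
    {L : PySem.Dict String Int} {M : PySem.Dict Int (List String)} {n : Int} {lx : Int}
    (hinv : pvInv ps (L, M, n))
    (h0 : PySem.List.pyGet? p 0 = some x) (h1 : PySem.List.pyGet? p 1 = some y)
    (hLx : L.get? x = some lx) (hLy : L.get? y = none) :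
    pvInv (ps ++ [p]) (L.insert y lx, M.modify lx [] (fun g => g ++ [y]), n) := by
  have hsome := inv_isSome hinv
  have hI1 := hinv.1
  have hI2 := hinv.2.1
  have hI3 := hinv.2.2
  dsimp only at hI1 hI2 hI3 hsome
  have hTy : ¬ pvTouched ps y := fun ht => by
    rcases (hsome y).mp ht with ⟨l, hl⟩; rw [hLy] at hl; cases hl
  have hTx : pvTouched ps x := (hsome x).mpr ⟨lx, hLx⟩
  have hxy : y ≠ x := fun h => by rw [h, hLx] at hLy; cases hLy
  have hlxn : lx < n := hI1 x lx hLx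
  refine ⟨?_, ?_, ?_⟩
  · intro w l hw
    dsimp only at hw ⊢
    rw [PySem.Dict.get?_insert] at hw
    split_ifs at hw with hwy
    · injection hw with hh; omega
    · exact hI1 w l hw
  · intro w l
    dsimp only
    rw [PySem.Dict.get?_insert, PySem.Dict.getD_modify]
    by_cases hllx : l = lx
    · rw [if_pos hllx]
      split_ifs with hwy
      · exact iff_of_true (by rw [hllx]) (by simp [hwy])
      · constructor
        · intro hw
          have hm := (hI2 w l).mp hw
          rw [hllx] at hm
          exact List.mem_append_left _ hm
        · intro hw
          rcases List.mem_append.mp hw with hm | hm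
          · exact (hI2 w l).mpr (by rw [hllx]; exact hm)
          · rw [List.mem_singleton] at hm; exact absurd hm hwy
    · rw [if_neg hllx]
      split_ifs with hwy
      · constructor
        · intro hw; injection hw with hh; exact absurd hh.symm hllx
        · intro hw
          have hc := (hI2 w l).mpr hw
          rw [hwy, hLy] at hc; cases hc
      · exact hI2 w l
  · intro a b
    dsimp only
    rw [pvTouched_append_good h0 h1 a, pvTouched_append_good h0 h1 b,
      rtg_append_good h0 h1 a b]
    simp only [PySem.Dict.get?_insert]
    have hRay : Relation.ReflTransGen (pvRel ps) a y ↔ a = y := rtg_untouched_right hTy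
    have hRyb : Relation.ReflTransGen (pvRel ps) y b ↔ y = b := rtg_untouched_left hTy
    have hRyx : Relation.ReflTransGen (pvRel ps) y x ↔ y = x := rtg_untouched_left hTy
    have hxc : ∀ c, (pvTouched ps c ∧ Relation.ReflTransGen (pvRel ps) x c) ↔
        L.get? c = some lx := by
      intro c; constructor
      · rintro ⟨hTc, hr⟩
        rcases (hsome c).mp hTc with ⟨lc, hlc⟩
        have he := (inv_conn hinv hLx hlc).mp hr
        rw [hlc, ← he]
      · intro hlc
        exact ⟨(hsome c).mpr ⟨lx, hlc⟩, (inv_conn hinv hLx hlc).mpr rfl⟩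
    by_cases hay : a = y <;> by_cases hby : b = y
    · subst hay; subst hby
      apply iff_of_true
      · exact ⟨lx, by simp, by simp⟩
      · exact ⟨Or.inr (Or.inr rfl), Or.inr (Or.inr rfl), Or.inl Relation.ReflTransGen.refl⟩
    · subst hay
      rw [if_pos rfl, if_neg hby]
      constructor
      · rintro ⟨l, hl1, hl2⟩
        injection hl1 with hh; subst hh
        have hTb := (hsome b).mpr ⟨_, hl2⟩
        have hr : Relation.ReflTransGen (pvRel ps) x b := ((hxc b).mpr hl2).2
        exact ⟨Or.inr (Or.inr rfl), Or.inl hTb,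
          Or.inr (Or.inr ⟨Relation.ReflTransGen.refl, hr⟩)⟩
      · rintro ⟨_, hTb', hd⟩
        have hlb : L.get? b = some lx := by
          rcases hd with hd | ⟨hd1, _⟩ | ⟨_, hd2⟩
          · exact absurd (hRyb.mp hd).symm hby
          · exact absurd (hRyx.mp hd1) hxy
          · rcases hTb' with h | h | h
            · exact (hxc b).mp ⟨h, hd2⟩
            · rw [h]; exact hLx
            · exact absurd h hby
        exact ⟨lx, rfl, hlb⟩
    · subst hby
      rw [if_pos rfl, if_neg hay]
      constructor
      · rintro ⟨l, hl1, hl2⟩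
        injection hl2 with hh; subst hh
        have hTa := (hsome a).mpr ⟨_, hl1⟩
        have hr : Relation.ReflTransGen (pvRel ps) x a := ((hxc a).mpr hl1).2
        exact ⟨Or.inl hTa, Or.inr (Or.inr rfl),
          Or.inr (Or.inl ⟨rtg_pvRel_symm hr, Relation.ReflTransGen.refl⟩)⟩
      · rintro ⟨hTa', _, hd⟩
        have hla : L.get? a = some lx := by
          rcases hd with hd | ⟨hd1, _⟩ | ⟨hd1, _⟩
          · exact absurd ((rtg_untouched_right hTy).mp hd) hay
          · rcases hTa' with h | h | h
            · exact (hxc a).mp ⟨h, rtg_pvRel_symm hd1⟩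
            · rw [h]; exact hLx
            · exact absurd h hay
          · exact absurd (hRay.mp hd1) hay
        exact ⟨lx, hla, rfl⟩
    · rw [if_neg hay, if_neg hby]
      constructor
      · intro hl
        obtain ⟨hTa, hTb, hr⟩ := (hI3 a b).mp hl
        exact ⟨Or.inl hTa, Or.inl hTb, Or.inl hr⟩
      · rintro ⟨hTa', hTb', hd⟩
        have hTa : pvTouched ps a := by
          rcases hTa' with h | h | h
          · exact h
          · rw [h]; exact hTx
          · exact absurd h hay
        have hTb : pvTouched ps b := by
          rcases hTb' with h | h | h
          · exact h
          · rw [h]; exact hTx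
          · exact absurd h hby
        have hr : Relation.ReflTransGen (pvRel ps) a b := by
          rcases hd with hd | ⟨_, hd2⟩ | ⟨hd1, _⟩
          · exact hd
          · exact absurd (hRyb.mp hd2).symm hby
          · exact absurd (hRay.mp hd1) hay
        exact (hI3 a b).mpr ⟨hTa, hTb, hr⟩

theorem branch_SS_eq {ps : List (List String)} {p : List String} {x y : String}
    {L : PySem.Dict String Int} {M : PySem.Dict Int (List String)} {n : Int} {lx : Int}
    (hinv : pvInv ps (L, M, n))
    (h0 : PySem.List.pyGet? p 0 = some x) (h1 : PySem.List.pyGet? p 1 = some y)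
    (hLx : L.get? x = some lx) (hLy : L.get? y = some lx) :
    pvInv (ps ++ [p]) (L, M, n) := by
  have hsome := inv_isSome hinv
  have hI3 := hinv.2.2
  dsimp only at hI3 hsome
  have hTx : pvTouched ps x := (hsome x).mpr ⟨lx, hLx⟩
  have hTy : pvTouched ps y := (hsome y).mpr ⟨lx, hLy⟩
  have hxy : Relation.ReflTransGen (pvRel ps) x y := (inv_conn hinv hLx hLy).mpr rfl
  refine ⟨hinv.1, hinv.2.1, ?_⟩
  intro a b
  dsimp only
  rw [pvTouched_append_good h0 h1 a, pvTouched_append_good h0 h1 b,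
    rtg_append_good h0 h1 a b]
  constructor
  · intro hl
    obtain ⟨hTa, hTb, hr⟩ := (hI3 a b).mp hl
    exact ⟨Or.inl hTa, Or.inl hTb, Or.inl hr⟩
  · rintro ⟨hTa', hTb', hd⟩
    have hTa : pvTouched ps a := by
      rcases hTa' with h | h | h
      · exact h
      · rw [h]; exact hTx
      · rw [h]; exact hTy
    have hTb : pvTouched ps b := by
      rcases hTb' with h | h | h
      · exact h
      · rw [h]; exact hTx
      · rw [h]; exact hTy
    have hr : Relation.ReflTransGen (pvRel ps) a b := by
      rcases hd with hd | ⟨hd1, hd2⟩ | ⟨hd1, hd2⟩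
      · exact hd
      · exact (hd1.trans hxy).trans hd2
      · exact (hd1.trans (rtg_pvRel_symm hxy)).trans hd2
    exact (hI3 a b).mpr ⟨hTa, hTb, hr⟩

theorem branch_SS_merge {ps : List (List String)} {p : List String} {x y u v : String}
    {L : PySem.Dict String Int} {M : PySem.Dict Int (List String)} {n : Int} {la lb : Int}
    (hinv : pvInv ps (L, M, n))
    (h0 : PySem.List.pyGet? p 0 = some x) (h1 : PySem.List.pyGet? p 1 = some y)
    (hLu : L.get? u = some la) (hLv : L.get? v = some lb) (hlab : la ≠ lb)
    (hperm : (u = x ∧ v = y) ∨ (u = y ∧ v = x)) :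
    pvInv (ps ++ [p])
      ((M.getD lb []).foldl (fun d w => d.insert w la) L,
        (M.modify la [] (fun g => g ++ M.getD lb [])).erase lb, n) := by
  have hsome := inv_isSome hinv
  have hI1 := hinv.1
  have hI2 := hinv.2.1
  have hI3 := hinv.2.2
  dsimp only at hI1 hI2 hI3 hsome
  have hTu : pvTouched ps u := (hsome u).mpr ⟨la, hLu⟩
  have hTv : pvTouched ps v := (hsome v).mpr ⟨lb, hLv⟩
  have hlan : la < n := hI1 u la hLu
  have hgb : ∀ c, c ∈ M.getD lb [] ↔ L.get? c = some lb := fun c => (hI2 c lb).symm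
  have hL' : ∀ c, ((M.getD lb []).foldl (fun d w => d.insert w la) L).get? c =
      if L.get? c = some lb then some la else L.get? c := by
    intro c
    rw [get?_foldl_insert_const]
    by_cases hc : c ∈ M.getD lb []
    · rw [if_pos hc, if_pos ((hgb c).mp hc)]
    · rw [if_neg hc, if_neg (fun hh => hc ((hgb c).mpr hh))]
  have hM' : ∀ l, ((M.modify la [] (fun g => g ++ M.getD lb [])).erase lb).getD l [] =
      if l = lb then [] else if l = la then M.getD la [] ++ M.getD lb [] else M.getD l [] := by
    intro l
    rw [PySem.Dict.getD_eq_get?_getD, dict_get?_erase]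
    by_cases hlb : l = lb
    · simp [hlb]
    · rw [if_neg hlb, if_neg hlb, ← PySem.Dict.getD_eq_get?_getD, PySem.Dict.getD_modify]
  refine ⟨?_, ?_, ?_⟩
  · intro w l hw
    dsimp only at hw ⊢
    rw [hL' w] at hw
    split_ifs at hw with hwb
    · injection hw with hh; omega
    · exact hI1 w l hw
  · intro w l
    dsimp only
    rw [hL' w, hM' l]
    by_cases hllb : l = lb
    · rw [if_pos hllb]
      apply iff_of_false
      · intro hw
        split_ifs at hw with hwb
        · injection hw with hh; exact hlab (hh.trans hllb)
        · exact hwb (hw.trans (by rw [hllb]))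
      · exact List.not_mem_nil
    · rw [if_neg hllb]
      by_cases hlla : l = la
      · rw [if_pos hlla]
        split_ifs with hwb
        · apply iff_of_true
          · rw [hlla]
          · exact List.mem_append_right _ ((hgb w).mpr hwb)
        · constructor
          · intro hw
            have hm := (hI2 w l).mp hw
            rw [hlla] at hm
            exact List.mem_append_left _ hm
          · intro hw
            rcases List.mem_append.mp hw with hm | hm
            · exact (hI2 w l).mpr (by rw [hlla]; exact hm)
            · exact absurd ((hgb w).mp hm) hwb
      · rw [if_neg hlla]
        split_ifs with hwb
        · apply iff_of_false
          · intro hw; injection hw with hh; exact hlla hh.symm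
          · intro hw
            have := (hI2 w l).mpr hw
            rw [hwb] at this
            injection this with hh; exact hllb hh.symm
        · exact hI2 w l
  · intro a b
    dsimp only
    rw [pvTouched_append_good h0 h1 a, pvTouched_append_good h0 h1 b,
      rtg_append_good h0 h1 a b]
    simp only [hL']
    have hdisj : ∀ c d : String,
        (Relation.ReflTransGen (pvRel ps) c d ∨
          (Relation.ReflTransGen (pvRel ps) c x ∧ Relation.ReflTransGen (pvRel ps) y d) ∨
          (Relation.ReflTransGen (pvRel ps) c y ∧ Relation.ReflTransGen (pvRel ps) x d)) ↔
        (Relation.ReflTransGen (pvRel ps) c d ∨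
          (Relation.ReflTransGen (pvRel ps) c u ∧ Relation.ReflTransGen (pvRel ps) v d) ∨
          (Relation.ReflTransGen (pvRel ps) c v ∧ Relation.ReflTransGen (pvRel ps) u d)) := by
      intro c d
      rcases hperm with ⟨rfl, rfl⟩ | ⟨rfl, rfl⟩
      · exact Iff.rfl
      · tauto
    have hTxy : ∀ c, (c = x ∨ c = y) → pvTouched ps c := by
      intro c hc
      rcases hperm with ⟨rfl, rfl⟩ | ⟨rfl, rfl⟩ <;> rcases hc with rfl | rfl <;>
        first | exact hTu | exact hTv
    cases hLa : L.get? a with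
    | none =>
      have hTa : ¬ pvTouched ps a := fun ht => by
        rcases (hsome a).mp ht with ⟨l, hl⟩; rw [hLa] at hl; cases hl
      apply iff_of_false
      · rintro ⟨l, hl1, _⟩
        simp at hl1
      · rintro ⟨hTa', _, _⟩
        rcases hTa' with h | h | h
        · exact hTa h
        · exact hTa (hTxy a (Or.inl h))
        · exact hTa (hTxy a (Or.inr h))
    | some lca =>
      cases hLb : L.get? b with
      | none =>
        have hTb : ¬ pvTouched ps b := fun ht => by
          rcases (hsome b).mp ht with ⟨l, hl⟩; rw [hLb] at hl; cases hl
        apply iff_of_false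
        · rintro ⟨l, _, hl2⟩
          simp at hl2
        · rintro ⟨_, hTb', _⟩
          rcases hTb' with h | h | h
          · exact hTb h
          · exact hTb (hTxy b (Or.inl h))
          · exact hTb (hTxy b (Or.inr h))
      | some lcb =>
        have hTa : pvTouched ps a := (hsome a).mpr ⟨lca, hLa⟩
        have hTb : pvTouched ps b := (hsome b).mpr ⟨lcb, hLb⟩
        have e1 : Relation.ReflTransGen (pvRel ps) a b ↔ lca = lcb :=
          inv_conn hinv hLa hLb
        have e2 : Relation.ReflTransGen (pvRel ps) a u ↔ lca = la :=
          inv_conn hinv hLa hLu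
        have e3 : Relation.ReflTransGen (pvRel ps) v b ↔ lb = lcb :=
          inv_conn hinv hLv hLb
        have e4 : Relation.ReflTransGen (pvRel ps) a v ↔ lca = lb :=
          inv_conn hinv hLa hLv
        have e5 : Relation.ReflTransGen (pvRel ps) u b ↔ la = lcb :=
          inv_conn hinv hLu hLb
        simp only [Option.some_inj]
        rw [show (if lca = lb then (some la : Option Int) else some lca) =
              some (if lca = lb then la else lca) from by split_ifs <;> rfl,
            show (if lcb = lb then (some la : Option Int) else some lcb) =
              some (if lcb = lb then la else lcb) from by split_ifs <;> rfl]
        constructor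
        · rintro ⟨l, hl1, hl2⟩
          rw [Option.some_inj] at hl1 hl2
          have hAB : (if lca = lb then la else lca) = (if lcb = lb then la else lcb) :=
            hl1.trans hl2.symm
          refine ⟨Or.inl hTa, Or.inl hTb, ?_⟩
          rw [hdisj a b, e1, e2, e3, e4, e5]
          split_ifs at hAB <;> omega
        · rintro ⟨_, _, hd⟩
          rw [hdisj a b, e1, e2, e3, e4, e5] at hd
          refine ⟨if lcb = lb then la else lcb, ?_, rfl⟩
          rw [Option.some_inj]
          split_ifs <;> omega

theorem bStep_inv {ps : List (List String)} {p : List String}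
    {st : PySem.Dict String Int × PySem.Dict Int (List String) × Int}
    (h : pvInv ps st) : pvInv (ps ++ [p]) (bStep st p) := by
  obtain ⟨L, M, n⟩ := st
  cases h0 : PySem.List.pyGet? p 0 with
  | none =>
    have hb : bStep (L, M, n) p = (L, M, n) := by
      cases h1 : PySem.List.pyGet? p 1 <;> simp [bStep, h0, h1]
    rw [hb]
    exact pvInv_append_bad (Or.inl h0) h
  | some x =>
    cases h1 : PySem.List.pyGet? p 1 with
    | none =>
      have hb : bStep (L, M, n) p = (L, M, n) := by simp [bStep, h0, h1]
      rw [hb]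
      exact pvInv_append_bad (Or.inr h1) h
    | some y =>
      cases hLx : L.get? x with
      | none =>
        cases hLy : L.get? y with
        | none =>
          have hb : bStep (L, M, n) p =
              ((L.insert x n).insert y n, M.insert n [x, y], n + 1) := by
            simp [bStep, h0, h1, hLx, hLy]
          rw [hb]
          exact branch_NN h h0 h1 hLx hLy
        | some ly =>
          have hb : bStep (L, M, n) p =
              (L.insert x ly, M.modify ly [] (fun g => g ++ [x]), n) := by
            simp [bStep, h0, h1, hLx, hLy]
          rw [hb]
          exact branch_NS h h0 h1 hLx hLy
      | some lx =>
        cases hLy : L.get? y with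
        | none =>
          have hb : bStep (L, M, n) p =
              (L.insert y lx, M.modify lx [] (fun g => g ++ [y]), n) := by
            simp [bStep, h0, h1, hLx, hLy]
          rw [hb]
          exact branch_SN h h0 h1 hLx hLy
        | some ly =>
          by_cases heq : lx = ly
          · have hb : bStep (L, M, n) p = (L, M, n) := by
              simp [bStep, h0, h1, hLx, hLy, heq]
            rw [hb]
            subst heq
            exact branch_SS_eq h h0 h1 hLx hLy
          · by_cases hlen : (M.getD lx []).length < (M.getD ly []).length
            · have hb : bStep (L, M, n) p =
                  ((M.getD lx []).foldl (fun d w => d.insert w ly) L,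
                    (M.modify ly [] (fun g => g ++ M.getD lx [])).erase lx, n) := by
                simp [bStep, h0, h1, hLx, hLy, heq, hlen]
              rw [hb]
              exact branch_SS_merge h h0 h1 hLy hLx (fun hh => heq hh.symm)
                (Or.inr ⟨rfl, rfl⟩)
            · have hb : bStep (L, M, n) p =
                  ((M.getD ly []).foldl (fun d w => d.insert w lx) L,
                    (M.modify lx [] (fun g => g ++ M.getD ly [])).erase ly, n) := by
                simp [bStep, h0, h1, hLx, hLy, heq, hlen]
              rw [hb]
              exact branch_SS_merge h h0 h1 hLx hLy heq (Or.inl ⟨rfl, rfl⟩)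

theorem bfold_inv (pairs : List (List String)) :
    pvInv pairs (pairs.foldl bStep (PySem.Dict.empty, PySem.Dict.empty, 0)) := by
  have base : pvInv [] ((PySem.Dict.empty : PySem.Dict String Int),
      (PySem.Dict.empty : PySem.Dict Int (List String)), (0 : Int)) := by
    refine ⟨?_, ?_, ?_⟩
    · intro w l hw; simp [PySem.Dict.get?_empty] at hw
    · intro w l; simp [PySem.Dict.get?_empty, PySem.Dict.getD_empty]
    · intro a b; simp [PySem.Dict.get?_empty, pvTouched]
  suffices h : ∀ (ps ps0 : List (List String)) st, pvInv ps0 st →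
      pvInv (ps0 ++ ps) (ps.foldl bStep st) by
    simpa using h pairs [] _ base
  intro ps
  induction ps with
  | nil => intro ps0 st h; simpa using h
  | cons q ps ihq =>
    intro ps0 st h
    rw [List.foldl_cons]
    have hres := ihq (ps0 ++ [q]) (bStep st q) (bStep_inv h)
    simpa using hres




-- ---- glue ----

theorem guard_iff (pairs : List (List String)) (a b : String) (hne : a ≠ b) :
    (((!(findAllSubSets (buildDic pairs) (2 * pairs.length + 1) a PySem.Set.empty).isEmpty) &&
        PySem.Set.contains (findAllSubSets (buildDic pairs) (2 * pairs.length + 1) a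
          PySem.Set.empty) b) = true) ↔
      (∃ la, (pairs.foldl bStep (PySem.Dict.empty, PySem.Dict.empty, 0)).1.get? a = some la ∧
        (pairs.foldl bStep (PySem.Dict.empty, PySem.Dict.empty, 0)).1.get? b = some la) := by
  have hmem : ((!(findAllSubSets (buildDic pairs) (2 * pairs.length + 1) a
        PySem.Set.empty).isEmpty) &&
      PySem.Set.contains (findAllSubSets (buildDic pairs) (2 * pairs.length + 1) a
        PySem.Set.empty) b) = true ↔
      b ∈ findAllSubSets (buildDic pairs) (2 * pairs.length + 1) a PySem.Set.empty := by
    rw [Bool.and_eq_true]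
    constructor
    · rintro ⟨_, hc⟩
      exact (PySem.Set.contains_iff _ _).mp hc
    · intro hb
      refine ⟨?_, (PySem.Set.contains_iff _ _).mpr hb⟩
      rw [Bool.not_eq_eq_eq_not, Bool.not_true, List.isEmpty_eq_false_iff_exists_mem]
      exact ⟨b, hb⟩
  rw [hmem, mem_findAll_iff, tg_pvRel_iff hne]
  exact ((bfold_inv pairs).2.2 a b).symm

theorem loop_eq (pairs : List (List String)) :
    ∀ l1 l2 : List String,
      loopA (buildDic pairs) (2 * pairs.length + 1) l1 l2 =
        loopB (pairs.foldl bStep (PySem.Dict.empty, PySem.Dict.empty, 0)).1 l1 l2 := by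
  intro l1
  induction l1 with
  | nil => intro l2; cases l2 <;> rfl
  | cons a r1 ih =>
    intro l2
    cases l2 with
    | nil => rfl
    | cons b r2 =>
      simp only [loopA, loopB]
      by_cases hab : a = b
      · rw [if_pos hab, if_pos hab]
        exact ih r2
      · rw [if_neg hab, if_neg hab]
        cases hga : (pairs.foldl bStep (PySem.Dict.empty, PySem.Dict.empty, 0)).1.get? a with
        | none =>
          dsimp only
          rw [if_neg]
          intro hgt
          rcases (guard_iff pairs a b hab).mp hgt with ⟨la, h1, _⟩
          rw [hga] at h1; cases h1
        | some la =>
          dsimp only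
          by_cases hgb : (pairs.foldl bStep
              (PySem.Dict.empty, PySem.Dict.empty, 0)).1.get? b = some la
          · rw [if_pos ((guard_iff pairs a b hab).mpr ⟨la, hga, hgb⟩), if_pos hgb]
            exact ih r2
          · rw [if_neg, if_neg hgb]
            intro hgt
            rcases (guard_iff pairs a b hab).mp hgt with ⟨la', h1, h2⟩
            rw [hga] at h1
            injection h1 with hh
            rw [hh] at hgb
            exact hgb h2

theorem ports_eq (w1 w2 : List String) (ps : List (List String)) :
    areSentencesSimilarTwo2 w1 w2 ps = areSentencesSimilarTwo2_alt w1 w2 ps := by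
  unfold areSentencesSimilarTwo2 areSentencesSimilarTwo2_alt
  cases w1 with
  | nil =>
    cases w2 with
    | nil => rfl
    | cons b r2 => simp
  | cons a r1 =>
    cases w2 with
    | nil => simp
    | cons b r2 =>
      by_cases hlen : r1.length = r2.length
      · rw [if_neg (by simp), if_neg (by simp; omega), if_neg (by simp; omega)]
        exact loop_eq ps (a :: r1) (b :: r2)
      · rw [if_neg (by simp), if_pos (by simp; omega), if_pos (by simp; omega)]


-- ===== VERDICT (by name: the statement is the Claim_ definition above) =====
theorem areSentencesSimilarTwo2_spec : Claim_equal_areSentencesSimilarTwo2 := by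
  intro words1 words2 pairs _ _
  unfold Spec_areSentencesSimilarTwo2
  exact ports_eq words1 words2 pairs
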